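-- pv_equiv track=rewrite | github.com/thiliapr/tkaimidi | utils.py | sheet_to_model
-- ===== SOURCE A (Python) =====
-- def sheet_to_model(sheet: list[tuple[str, int]]) -> list[int]:
--     """
--     将电子乐谱转换为模型的输入/输出格式。
--
--     Args:
--         sheet: 由`notes_to_sheet(notes)`生成的电子乐谱
--
--     Returns:
--         模型数据:
--             - 0-11: 音符 (0-11表示音阶中的音高)
--             - 12-23: 全局音高向下偏移的半音数。如果值小于-12，被转换成多个向下跳跃。
--             - 24-35: 全局音高向上偏移的半音数。如果值大于12，被转换成多个向下跳跃。
--             - 36-38: 一个音符向下跳跃的八度数。如果值小于-3，被转换成多个向下跳跃。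
--             - 39-41: 一个音符向上跳跃的八度数。如果值大于3，被转换成多个向上跳跃。
--             - 42-43: 时间间隔。如果值大于2，被转换成多个时间间隔。
--         原本乐谱在模型输入格式中对应的位置
--     """
--     model_data = []
--     sheet_positions = []
--
--     for event, value in sheet:
--         sheet_positions.append(len(model_data))
--         if event == "note":
--             # 处理音符
--             model_data.append(value)  # 0-11表示音阶中的音高
--         elif event == "key_shift":
--             # 处理全局音高偏移
--             if value < 0:
--                 # 向下偏移
--                 while value < -12:
--                     model_data.append(23)
--                     value += 12
--                 if value:
--                     model_data.append(11 - value)  # 12-23表示全局音高向下偏移1-12个半音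
--             else:
--                 # 向上偏移
--                 while value > 12:
--                     model_data.append(35)
--                     value -= 12
--                 if value:
--                     model_data.append(23 + value)  # 24-35表示全局音高向上偏移1-12个半音
--         elif event == "octave_jump":
--             # 处理八度跳跃
--             if value < 0:
--                 # 向下跳跃
--                 while value < -3:
--                     model_data.append(38)
--                     value += 3
--                 if value:
--                     model_data.append(35 - value)  # 36-38表示一个音符向下跳跃1-3个八度
--             else:
--                 # 向上跳跃
--                 while value > 2:
--                     model_data.append(41)
--                     value -= 3
--                 if value:
--                     model_data.append(38 + value)  # 39-41表示一个音符向上跳跃1-3个八度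
--         elif event == "interval":
--             # 处理时间间隔
--             while value > 2:
--                 model_data.append(43)
--                 value -= 2
--             model_data.append(41 + value)  # 42-43表示时间间隔
--
--     return model_data, sheet_positions
-- ===== SOURCE B (Python) =====
-- def sheet_to_model(sheet: list[tuple[str, int]]) -> list[int]:
--     # Per-event closed-form token chunks, then concatenate; positions are prefix sums of chunk lengths.
--     def tokens(event, value):
--         if event == "note":
--             return [value]
--         if event == "key_shift":
--             if value < 0:
--                 q = (-value - 1) // 12
--                 return [23] * q + [11 - (value + 12 * q)]
--             q = (value - 1) // 12 if value > 0 else 0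
--             r = value - 12 * q
--             return [35] * q + ([23 + r] if r else [])
--         if event == "octave_jump":
--             if value < 0:
--                 q = (-value - 1) // 3
--                 return [38] * q + [35 - (value + 3 * q)]
--             q, r = divmod(value, 3)
--             return [41] * q + ([38 + r] if r else [])
--         if event == "interval":
--             q = (value - 1) // 2 if value > 2 else 0
--             return [43] * q + [41 + value - 2 * q]
--         return []
--
--     chunks = [tokens(e, v) for e, v in sheet]
--     model_data = [t for c in chunks for t in c]
--     positions, n = [], 0
--     for c in chunks:
--         positions.append(n)
--         n += len(c)
--     return model_data, positions
-- ===== Notes on version B (the rewrite author's own statement) =====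
-- stated objective: simpler
-- what changed: Replaces each per-event countdown while-loop with a closed-form divmod computation of the repeat count ([cap]*q plus one remainder token), builds per-event token chunks with a pure helper, and derives sheet_positions as prefix sums of chunk lengths instead of recording len(model_data) inside the mutating loop.
import Mathlib
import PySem

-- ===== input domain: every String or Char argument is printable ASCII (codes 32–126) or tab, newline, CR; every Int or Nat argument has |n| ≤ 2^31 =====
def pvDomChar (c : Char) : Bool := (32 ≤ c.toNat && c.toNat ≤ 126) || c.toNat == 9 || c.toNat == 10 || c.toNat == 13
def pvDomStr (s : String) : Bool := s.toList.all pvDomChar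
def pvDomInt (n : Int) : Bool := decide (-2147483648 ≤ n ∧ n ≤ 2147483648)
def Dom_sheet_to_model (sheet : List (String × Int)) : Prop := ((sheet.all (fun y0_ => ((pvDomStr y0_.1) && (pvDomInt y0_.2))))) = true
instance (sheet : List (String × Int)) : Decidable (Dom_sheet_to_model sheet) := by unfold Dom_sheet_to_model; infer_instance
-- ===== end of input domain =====

-- B replaces A's per-event countdown while-loops by closed-form divmod chunk construction
-- and computes positions as prefix sums of chunk lengths (objective: simpler).

-- ===== PORT A =====
-- the four while-loops of A, each returning (final value, extended model_data)
def ksNegLoop (value : Int) (md : List Int) : Int × List Int :=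
  if value < -12 then ksNegLoop (value + 12) (md ++ [23]) else (value, md)
termination_by (-value).toNat
decreasing_by omega

def ksPosLoop (value : Int) (md : List Int) : Int × List Int :=
  if value > 12 then ksPosLoop (value - 12) (md ++ [35]) else (value, md)
termination_by value.toNat
decreasing_by omega

def ojNegLoop (value : Int) (md : List Int) : Int × List Int :=
  if value < -3 then ojNegLoop (value + 3) (md ++ [38]) else (value, md)
termination_by (-value).toNat
decreasing_by omega

def ojPosLoop (value : Int) (md : List Int) : Int × List Int :=
  if value > 2 then ojPosLoop (value - 3) (md ++ [41]) else (value, md)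
termination_by value.toNat
decreasing_by omega

def ivLoop (value : Int) (md : List Int) : Int × List Int :=
  if value > 2 then ivLoop (value - 2) (md ++ [43]) else (value, md)
termination_by value.toNat
decreasing_by omega

-- the body of A's for-loop acting on model_data
def stepA (md : List Int) (event : String) (value : Int) : List Int :=
  if event = "note" then md ++ [value]
  else if event = "key_shift" then
    if value < 0 then
      let p := ksNegLoop value md
      if p.1 ≠ 0 then p.2 ++ [11 - p.1] else p.2
    else
      let p := ksPosLoop value md
      if p.1 ≠ 0 then p.2 ++ [23 + p.1] else p.2
  else if event = "octave_jump" then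
    if value < 0 then
      let p := ojNegLoop value md
      if p.1 ≠ 0 then p.2 ++ [35 - p.1] else p.2
    else
      let p := ojPosLoop value md
      if p.1 ≠ 0 then p.2 ++ [38 + p.1] else p.2
  else if event = "interval" then
    let p := ivLoop value md
    p.2 ++ [41 + p.1]
  else md

def loopA (sheet : List (String × Int)) (st : List Int × List Int) : List Int × List Int :=
  match sheet with
  | [] => st
  | (event, value) :: rest =>
      loopA rest (stepA st.1 event value, st.2 ++ [(st.1.length : Int)])

def sheet_to_model (sheet : List (String × Int)) : List Int × List Int :=
  loopA sheet ([], [])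

-- ===== PORT B =====
def tokensB (event : String) (value : Int) : List Int :=
  if event = "note" then [value]
  else if event = "key_shift" then
    if value < 0 then
      let q := PySem.Int.floordiv (-value - 1) 12
      List.replicate q.toNat 23 ++ [11 - (value + 12 * q)]
    else
      let q := if value > 0 then PySem.Int.floordiv (value - 1) 12 else 0
      let r := value - 12 * q
      List.replicate q.toNat 35 ++ (if r ≠ 0 then [23 + r] else [])
  else if event = "octave_jump" then
    if value < 0 then
      let q := PySem.Int.floordiv (-value - 1) 3
      List.replicate q.toNat 38 ++ [35 - (value + 3 * q)]
    else
      let q := PySem.Int.floordiv value 3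
      let r := PySem.Int.mod value 3
      List.replicate q.toNat 41 ++ (if r ≠ 0 then [38 + r] else [])
  else if event = "interval" then
    let q := if value > 2 then PySem.Int.floordiv (value - 1) 2 else 0
    List.replicate q.toNat 43 ++ [41 + value - 2 * q]
  else []

def sheet_to_model_alt (sheet : List (String × Int)) : List Int × List Int :=
  let chunks := sheet.map (fun ev => tokensB ev.1 ev.2)
  let model_data := chunks.flatten
  let positions :=
    (chunks.foldl (fun (st : List Int × Int) c => (st.1 ++ [st.2], st.2 + (c.length : Int))) ([], 0)).1
  (model_data, positions)

-- ===== PRECONDITION & SPEC =====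
def Spec_sheet_to_model (sheet : List (String × Int)) (out : List Int × List Int) : Prop := out = sheet_to_model_alt sheet
instance (sheet : List (String × Int)) (out : List Int × List Int) : Decidable (Spec_sheet_to_model sheet out) := by unfold Spec_sheet_to_model; infer_instance

-- ===== CLAIM (what is proved, stated in full; the proofs are below) =====
def Claim_equal_sheet_to_model : Prop := ∀ (sheet : List (String × Int)), Dom_sheet_to_model sheet → Spec_sheet_to_model sheet (sheet_to_model sheet)

-- ===== LEMMAS AND PROOFS =====

lemma ksNegLoop_eq (v : Int) (md : List Int) (hv : v < 0) :
    ksNegLoop v md = (v + 12 * ((-v - 1) / 12), md ++ List.replicate ((-v - 1) / 12).toNat 23) := by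
  fun_induction ksNegLoop v md with
  | case1 v md h ih =>
    rw [ih (by omega), Prod.mk.injEq]
    have hq : ((-v - 1) / 12).toNat = ((-(v + 12) - 1) / 12).toNat + 1 := by omega
    exact ⟨by omega, by rw [hq, List.replicate_succ]; simp⟩
  | case2 v md h =>
    have : (-v - 1) / 12 = 0 := by omega
    simp [this]

lemma ksPosLoop_eq (v : Int) (md : List Int) (hv : 0 < v) :
    ksPosLoop v md = (v - 12 * ((v - 1) / 12), md ++ List.replicate ((v - 1) / 12).toNat 35) := by
  fun_induction ksPosLoop v md with
  | case1 v md h ih =>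
    rw [ih (by omega), Prod.mk.injEq]
    have hq : ((v - 1) / 12).toNat = ((v - 12 - 1) / 12).toNat + 1 := by omega
    exact ⟨by omega, by rw [hq, List.replicate_succ]; simp⟩
  | case2 v md h =>
    have : (v - 1) / 12 = 0 := by omega
    simp [this]

lemma ojNegLoop_eq (v : Int) (md : List Int) (hv : v < 0) :
    ojNegLoop v md = (v + 3 * ((-v - 1) / 3), md ++ List.replicate ((-v - 1) / 3).toNat 38) := by
  fun_induction ojNegLoop v md with
  | case1 v md h ih =>
    rw [ih (by omega), Prod.mk.injEq]
    have hq : ((-v - 1) / 3).toNat = ((-(v + 3) - 1) / 3).toNat + 1 := by omega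
    exact ⟨by omega, by rw [hq, List.replicate_succ]; simp⟩
  | case2 v md h =>
    have : (-v - 1) / 3 = 0 := by omega
    simp [this]

lemma ojPosLoop_eq (v : Int) (md : List Int) (hv : 0 ≤ v) :
    ojPosLoop v md = (v - 3 * (v / 3), md ++ List.replicate (v / 3).toNat 41) := by
  fun_induction ojPosLoop v md with
  | case1 v md h ih =>
    rw [ih (by omega), Prod.mk.injEq]
    have hq : (v / 3).toNat = ((v - 3) / 3).toNat + 1 := by omega
    exact ⟨by omega, by rw [hq, List.replicate_succ]; simp⟩
  | case2 v md h =>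
    have : v / 3 = 0 := by omega
    simp [this]

lemma ivLoop_eq_pos (v : Int) (md : List Int) (hv : 2 < v) :
    ivLoop v md = (v - 2 * ((v - 1) / 2), md ++ List.replicate ((v - 1) / 2).toNat 43) := by
  fun_induction ivLoop v md with
  | case1 v md h ih =>
    by_cases h2 : 2 < v - 2
    · rw [ih h2, Prod.mk.injEq]
      have hq : ((v - 1) / 2).toNat = ((v - 2 - 1) / 2).toNat + 1 := by omega
      exact ⟨by omega, by rw [hq, List.replicate_succ]; simp⟩
    · rw [ivLoop, if_neg (by omega : ¬ v - 2 > 2)]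
      have : (v - 1) / 2 = 1 := by omega
      simp [this]
  | case2 v md h => omega

lemma ivLoop_eq_le (v : Int) (md : List Int) (hv : v ≤ 2) :
    ivLoop v md = (v, md) := by
  rw [ivLoop, if_neg (by omega)]

lemma stepA_eq (e : String) (v : Int) (md : List Int) :
    stepA md e v = md ++ tokensB e v := by
  simp only [stepA, tokensB]
  by_cases h1 : e = "note"
  · simp [h1]
  rw [if_neg h1, if_neg h1]
  by_cases h2 : e = "key_shift"
  · rw [if_pos h2, if_pos h2]
    by_cases hv : v < 0
    · rw [if_pos hv, if_pos hv, ksNegLoop_eq v md hv,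
        PySem.Int.floordiv_eq_ediv_of_pos (by omega : (0:Int) < 12)]
      have hne : v + 12 * ((-v - 1) / 12) ≠ 0 := by omega
      rw [if_pos hne]
      simp [List.append_assoc]
    · rw [if_neg hv, if_neg hv]
      by_cases hv0 : v > 0
      · rw [ksPosLoop_eq v md hv0, if_pos hv0,
          PySem.Int.floordiv_eq_ediv_of_pos (by omega : (0:Int) < 12)]
        by_cases hr : v - 12 * ((v - 1) / 12) ≠ 0
        · rw [if_pos hr, if_pos hr]
          simp [List.append_assoc]
        · rw [if_neg hr, if_neg hr]
          simp
      · rw [if_neg hv0]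
        have hv0' : v = 0 := by omega
        subst hv0'
        rw [ksPosLoop, if_neg (by norm_num : ¬ (0:Int) > 12)]
        norm_num
  rw [if_neg h2, if_neg h2]
  by_cases h3 : e = "octave_jump"
  · rw [if_pos h3, if_pos h3]
    by_cases hv : v < 0
    · rw [if_pos hv, if_pos hv, ojNegLoop_eq v md hv,
        PySem.Int.floordiv_eq_ediv_of_pos (by omega : (0:Int) < 3)]
      have hne : v + 3 * ((-v - 1) / 3) ≠ 0 := by omega
      rw [if_pos hne]
      simp [List.append_assoc]
    · rw [if_neg hv, if_neg hv, ojPosLoop_eq v md (by omega),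
        PySem.Int.floordiv_eq_ediv_of_pos (by omega : (0:Int) < 3),
        PySem.Int.mod_eq_emod_of_pos (by omega : (0:Int) < 3)]
      have hr : v - 3 * (v / 3) = v % 3 := by omega
      rw [hr]
      by_cases hz : v % 3 ≠ 0
      · rw [if_pos hz, if_pos hz]
        simp [List.append_assoc]
      · rw [if_neg hz, if_neg hz]
        simp
  rw [if_neg h3, if_neg h3]
  by_cases h4 : e = "interval"
  · rw [if_pos h4, if_pos h4]
    by_cases hv : v > 2
    · rw [ivLoop_eq_pos v md hv, if_pos hv,
        PySem.Int.floordiv_eq_ediv_of_pos (by omega : (0:Int) < 2)]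
      have h41 : 41 + (v - 2 * ((v - 1) / 2)) = 41 + v - 2 * ((v - 1) / 2) := by ring
      rw [h41]
      simp [List.append_assoc]
    · rw [ivLoop_eq_le v md (by omega), if_neg hv]
      norm_num
  · rw [if_neg h4, if_neg h4]
    simp

-- positions as prefix sums of chunk lengths, starting at n
def posSpec : List (List Int) → Int → List Int
  | [], _ => []
  | c :: cs, n => n :: posSpec cs (n + (c.length : Int))

lemma loopA_eq (sheet : List (String × Int)) :
    ∀ (md sp : List Int),
      loopA sheet (md, sp) =
        (md ++ (sheet.map (fun ev => tokensB ev.1 ev.2)).flatten,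
         sp ++ posSpec (sheet.map (fun ev => tokensB ev.1 ev.2)) (md.length : Int)) := by
  induction sheet with
  | nil => intro md sp; simp [loopA, posSpec]
  | cons ev rest ih =>
    intro md sp
    obtain ⟨e, v⟩ := ev
    rw [loopA]
    simp only
    rw [stepA_eq, ih]
    simp [posSpec, List.append_assoc]

lemma foldB_eq (chunks : List (List Int)) :
    ∀ (ps : List Int) (n : Int),
      (chunks.foldl (fun (st : List Int × Int) c => (st.1 ++ [st.2], st.2 + (c.length : Int))) (ps, n)).1
        = ps ++ posSpec chunks n := by
  induction chunks with
  | nil => intro ps n; simp [posSpec]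
  | cons c cs ih =>
    intro ps n
    simp only [List.foldl_cons]
    rw [ih]
    simp [posSpec]

-- ===== VERDICT (by name: the statement is the Claim_ definition above) =====
theorem sheet_to_model_spec : Claim_equal_sheet_to_model := by
  intro sheet _
  show sheet_to_model sheet = sheet_to_model_alt sheet
  simp only [sheet_to_model, sheet_to_model_alt]
  rw [loopA_eq, foldB_eq]
  simp
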